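-- pv_equiv track=rewrite | github.com/lschoe/mpyc | demos/PrefixOrExplained.py | prefix_or3
-- ===== SOURCE A (Python) =====
-- def prefix_or3(x):
--     n = len(x)
--     if n == 1:
--         return x[:]
--
--     y0 = prefix_or3(x[:n//2])
--     y1 = prefix_or3(x[n//2:])
--     a = y0[-1]
--     return y0 + [a | b for b in y1]  # all |s in parallel in 1 round
-- ===== SOURCE B (Python) =====
-- def prefix_or3(x):
--     out = []
--     for b in x:
--         a = b if not out else a | b
--         out.append(a)
--     return out
-- ===== Notes on version B (the rewrite author's own statement) =====
-- stated objective: faster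
-- what changed: Replaced the balanced divide-and-conquer recursion (split at n//2, recurse on both halves, OR the left half's last value into every right-half prefix) by a single flat left-to-right loop carrying the running OR.
import Mathlib
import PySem

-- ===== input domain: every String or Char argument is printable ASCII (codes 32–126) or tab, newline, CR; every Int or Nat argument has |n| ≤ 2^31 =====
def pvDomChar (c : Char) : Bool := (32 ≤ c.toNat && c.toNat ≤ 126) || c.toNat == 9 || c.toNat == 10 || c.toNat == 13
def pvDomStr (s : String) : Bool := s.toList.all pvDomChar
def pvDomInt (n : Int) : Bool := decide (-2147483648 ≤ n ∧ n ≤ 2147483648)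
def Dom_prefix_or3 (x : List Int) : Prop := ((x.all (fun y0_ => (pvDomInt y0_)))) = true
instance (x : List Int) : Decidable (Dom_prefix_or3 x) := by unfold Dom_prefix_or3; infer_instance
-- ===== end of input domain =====

-- B replaces A's balanced divide-and-conquer (split at n//2, OR the left half's last value into every right-half prefix) by a single flat left-to-right loop carrying the running OR; equivalence is proved on nonempty lists (Pre_).

-- ===== PORT A =====
-- 'if x.length ≤ 1 then x' covers Python's 'n == 1' base case; for [] (where Python recurses forever)
-- it merely makes the recursion total — [] is excluded by Pre_prefix_or3.
def prefix_or3 (x : List Int) : List Int :=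
  if x.length ≤ 1 then x
  else
    let y0 := prefix_or3 (x.take (x.length / 2))
    let y1 := prefix_or3 (x.drop (x.length / 2))
    let a := y0.getLastD 0            -- y0[-1]; y0 is nonempty on every reached call
    y0 ++ y1.map (fun b => PySem.Int.bor a b)
termination_by x.length
decreasing_by
  · simp only [List.length_take]; omega
  · simp only [List.length_drop]; omega

-- ===== PORT B =====
-- the loop state is (out, a); a's initial 0 is never read (Python's 'a' is unbound until the
-- first iteration, where 'not out' is true and the branch takes b)
def prefix_or3_alt (x : List Int) : List Int :=
  (x.foldl (fun (s : List Int × Int) b =>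
      let a := if s.1.isEmpty then b else PySem.Int.bor s.2 b
      (s.1 ++ [a], a)) ([], 0)).1

-- ===== PRECONDITION & SPEC =====
-- Pre_ excludes only the empty list, on which both Pythons recurse without end (RecursionError).
def Pre_prefix_or3 (x : List Int) : Prop := x ≠ []
instance (x : List Int) : Decidable (Pre_prefix_or3 x) := by unfold Pre_prefix_or3; infer_instance
def pvWitness_prefix_or3 : List Int := [5, 2, 8]

def Spec_prefix_or3 (x : List Int) (out : List Int) : Prop := out = prefix_or3_alt x
instance (x : List Int) (out : List Int) : Decidable (Spec_prefix_or3 x out) := by unfold Spec_prefix_or3; infer_instance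

-- ===== CLAIM (what is proved, stated in full; the proofs are below) =====
def Claim_equal_prefix_or3 : Prop := ∀ (x : List Int), Dom_prefix_or3 x → Pre_prefix_or3 x → Spec_prefix_or3 x (prefix_or3 x)

-- ===== LEMMAS AND PROOFS =====

-- PySem.Int.bor is Mathlib's Int.lor
theorem nat_ldiff_add_land (n m : Nat) : Nat.ldiff n m + (n &&& m) = n := by
  induction n using Nat.strong_induction_on generalizing m with
  | _ n ih =>
    rcases Nat.eq_zero_or_pos n with h0 | h0
    · subst h0; simp [Nat.ldiff]
    · have hdl : Nat.ldiff n m / 2 = Nat.ldiff (n / 2) (m / 2) := by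
        have := @Nat.bitwise_div_two_pow (fun a b => a && !b) n m 1 rfl
        simpa using this
      have hml : Nat.ldiff n m % 2 = Nat.ldiff (n % 2) (m % 2) := by
        have := @Nat.bitwise_mod_two_pow (fun a b => a && !b) n m 1 rfl
        simpa using this
      have hda : (n &&& m) / 2 = (n / 2) &&& (m / 2) := by
        have := @Nat.bitwise_div_two_pow and n m 1 rfl
        simpa [HAnd.hAnd, AndOp.and] using this
      have hma : (n &&& m) % 2 = (n % 2) &&& (m % 2) := by
        have := @Nat.bitwise_mod_two_pow and n m 1 rfl
        simpa [HAnd.hAnd, AndOp.and] using this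
      have ih' := ih (n / 2) (by omega) (m / 2)
      have hsmall : Nat.ldiff (n % 2) (m % 2) + (n % 2 &&& m % 2) = n % 2 := by
        have h1 : n % 2 = 0 ∨ n % 2 = 1 := by omega
        have h2 : m % 2 = 0 ∨ m % 2 = 1 := by omega
        rcases h1 with h1 | h1 <;> rcases h2 with h2 | h2 <;> rw [h1, h2] <;> simp [Nat.ldiff, Nat.bitwise]
      have e1 := Nat.div_add_mod (Nat.ldiff n m) 2
      have e2 := Nat.div_add_mod (n &&& m) 2
      have e3 := Nat.div_add_mod n 2
      omega

theorem nat_sub_land (n m : Nat) : n - (n &&& m) = Nat.ldiff n m := by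
  have := nat_ldiff_add_land n m
  omega

theorem bor_eq_lor (a b : Int) : PySem.Int.bor a b = Int.lor a b := by
  cases a with
  | ofNat m =>
    cases b with
    | ofNat n =>
      simp only [PySem.Int.bor, Int.lor]
      rw [if_pos (show (0:Int) ≤ Int.ofNat m from Int.natCast_nonneg m),
          if_pos (show (0:Int) ≤ Int.ofNat n from Int.natCast_nonneg n)]
      rfl
    | negSucc n =>
      simp only [PySem.Int.bor, Int.lor]
      rw [if_pos (show (0:Int) ≤ Int.ofNat m from Int.natCast_nonneg m),
          if_neg (show ¬ (0:Int) ≤ Int.negSucc n by rw [Int.negSucc_eq]; omega)]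
      have h2 : (-(Int.negSucc n) - 1).toNat = n := by
        simp [Int.negSucc_eq]
      have h3 : (Int.ofNat m).toNat = m := rfl
      rw [h2, h3, nat_sub_land]
      simp [Int.negSucc_eq]
      ring
  | negSucc m =>
    cases b with
    | ofNat n =>
      simp only [PySem.Int.bor, Int.lor]
      rw [if_neg (show ¬ (0:Int) ≤ Int.negSucc m by rw [Int.negSucc_eq]; omega),
          if_pos (show (0:Int) ≤ Int.ofNat n from Int.natCast_nonneg n)]
      have h2 : (-(Int.negSucc m) - 1).toNat = m := by
        simp [Int.negSucc_eq]
      have h3 : (Int.ofNat n).toNat = n := rfl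
      rw [h2, h3, nat_sub_land]
      simp [Int.negSucc_eq]
      ring
    | negSucc n =>
      simp only [PySem.Int.bor, Int.lor]
      rw [if_neg (show ¬ (0:Int) ≤ Int.negSucc m by rw [Int.negSucc_eq]; omega),
          if_neg (show ¬ (0:Int) ≤ Int.negSucc n by rw [Int.negSucc_eq]; omega)]
      have h2 : (-(Int.negSucc m) - 1).toNat = m := by
        simp [Int.negSucc_eq]
      have h3 : (-(Int.negSucc n) - 1).toNat = n := by
        simp [Int.negSucc_eq]
      rw [h2, h3]
      simp [Int.negSucc_eq]
      ring

theorem int_lor_assoc (a b c : Int) : Int.lor (Int.lor a b) c = Int.lor a (Int.lor b c) := by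
  cases a with
  | ofNat m => cases b with
    | ofNat n => cases c with
      | ofNat k => simp only [Int.lor]; rw [Nat.lor_assoc]
      | negSucc k =>
        simp only [Int.lor]
        congr 1
        apply Nat.eq_of_testBit_eq; intro i
        simp only [Nat.testBit_ldiff, Nat.testBit_lor]
        cases m.testBit i <;> cases n.testBit i <;> cases k.testBit i <;> rfl
    | negSucc n => cases c with
      | ofNat k =>
        simp only [Int.lor]
        congr 1
        apply Nat.eq_of_testBit_eq; intro i
        simp only [Nat.testBit_ldiff]
        cases m.testBit i <;> cases n.testBit i <;> cases k.testBit i <;> rfl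
      | negSucc k =>
        simp only [Int.lor]
        congr 1
        apply Nat.eq_of_testBit_eq; intro i
        simp only [Nat.testBit_ldiff, Nat.testBit_land]
        cases m.testBit i <;> cases n.testBit i <;> cases k.testBit i <;> rfl
  | negSucc m => cases b with
    | ofNat n => cases c with
      | ofNat k =>
        simp only [Int.lor]
        congr 1
        apply Nat.eq_of_testBit_eq; intro i
        simp only [Nat.testBit_ldiff, Nat.testBit_lor]
        cases m.testBit i <;> cases n.testBit i <;> cases k.testBit i <;> rfl
      | negSucc k =>
        simp only [Int.lor]
        congr 1
        apply Nat.eq_of_testBit_eq; intro i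
        simp only [Nat.testBit_ldiff, Nat.testBit_land]
        cases m.testBit i <;> cases n.testBit i <;> cases k.testBit i <;> rfl
    | negSucc n => cases c with
      | ofNat k =>
        simp only [Int.lor]
        congr 1
        apply Nat.eq_of_testBit_eq; intro i
        simp only [Nat.testBit_ldiff, Nat.testBit_land]
        cases m.testBit i <;> cases n.testBit i <;> cases k.testBit i <;> rfl
      | negSucc k => simp only [Int.lor]; rw [Nat.land_assoc]

theorem pybor_assoc (a b c : Int) :
    PySem.Int.bor (PySem.Int.bor a b) c = PySem.Int.bor a (PySem.Int.bor b c) := by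
  simp only [bor_eq_lor, int_lor_assoc]

-- the common specification: running prefix-OR starting from accumulator a
def orScan (a : Int) : List Int → List Int
  | [] => [a]
  | b :: l => a :: orScan (PySem.Int.bor a b) l

def scanOf : List Int → List Int
  | [] => []
  | h :: t => orScan h t

theorem orScan_ne_nil (a : Int) (l : List Int) : orScan a l ≠ [] := by
  cases l <;> simp [orScan]

theorem orScan_getLastD (a d : Int) (l : List Int) :
    (orScan a l).getLastD d = l.foldl PySem.Int.bor a := by
  induction l generalizing a with
  | nil => simp [orScan]
  | cons b l ih =>
    simp only [orScan, List.foldl_cons]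
    rw [List.getLastD_cons, ← ih (PySem.Int.bor a b)]
    cases h : orScan (PySem.Int.bor a b) l with
    | nil => exact absurd h (orScan_ne_nil _ _)
    | cons c r => simp [List.getLastD]

theorem orScan_append (a : Int) (l₁ : List Int) (b : Int) (l₂ : List Int) :
    orScan a (l₁ ++ b :: l₂) = orScan a l₁ ++ orScan (PySem.Int.bor (l₁.foldl PySem.Int.bor a) b) l₂ := by
  induction l₁ generalizing a with
  | nil => simp [orScan]
  | cons c l ih => simp [orScan, ih]

theorem orScan_map (c a : Int) (l : List Int) :
    (orScan a l).map (fun b => PySem.Int.bor c b) = orScan (PySem.Int.bor c a) l := by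
  induction l generalizing a with
  | nil => simp [orScan]
  | cons b l ih =>
    simp only [orScan, List.map_cons]
    rw [ih (PySem.Int.bor a b), pybor_assoc]

theorem scanOf_split (u v : List Int) (hu : u ≠ []) (hv : v ≠ []) :
    scanOf (u ++ v) =
      scanOf u ++ (scanOf v).map (fun b => PySem.Int.bor ((scanOf u).getLastD 0) b) := by
  obtain ⟨h, t, rfl⟩ := List.exists_cons_of_ne_nil hu
  obtain ⟨c, r, rfl⟩ := List.exists_cons_of_ne_nil hv
  simp only [scanOf, List.cons_append]
  rw [orScan_append, orScan_map, orScan_getLastD]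

theorem prefix_or3_aux : ∀ (n : Nat) (x : List Int), x.length ≤ n → x ≠ [] → prefix_or3 x = scanOf x := by
  intro n
  induction n with
  | zero =>
    intro x hl hx
    cases x with
    | nil => exact absurd rfl hx
    | cons a t => simp at hl
  | succ n ih =>
    intro x hl hx
    rw [prefix_or3]
    by_cases h1 : x.length ≤ 1
    · rw [if_pos h1]
      obtain ⟨a, t, rfl⟩ := List.exists_cons_of_ne_nil hx
      cases t with
      | nil => simp [scanOf, orScan]
      | cons b t => simp at h1
    · rw [if_neg h1]
      push Not at h1
      have hk1 : 1 ≤ x.length / 2 := by omega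
      have hk2 : x.length / 2 < x.length := by omega
      have htn : x.take (x.length / 2) ≠ [] := by
        apply List.ne_nil_of_length_pos
        simp [List.length_take]; omega
      have hdn : x.drop (x.length / 2) ≠ [] := by
        apply List.ne_nil_of_length_pos
        simp [List.length_drop]; omega
      have e0 := ih (x.take (x.length / 2)) (by simp [List.length_take]; omega) htn
      have e1 := ih (x.drop (x.length / 2)) (by simp [List.length_drop]; omega) hdn
      simp only [e0, e1]
      rw [← scanOf_split _ _ htn hdn, List.take_append_drop]

theorem prefix_or3_eq_scanOf (x : List Int) (hx : x ≠ []) : prefix_or3 x = scanOf x :=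
  prefix_or3_aux x.length x le_rfl hx

def scanTail (a : Int) : List Int → List Int
  | [] => []
  | b :: l => PySem.Int.bor a b :: scanTail (PySem.Int.bor a b) l

theorem orScan_eq_cons_scanTail (a : Int) (l : List Int) : orScan a l = a :: scanTail a l := by
  induction l generalizing a with
  | nil => rfl
  | cons b l ih => simp [orScan, scanTail, ih]

theorem alt_loop_inv (l out : List Int) (a : Int) (hout : out ≠ []) :
    (l.foldl (fun (s : List Int × Int) b =>
        let a := if s.1.isEmpty then b else PySem.Int.bor s.2 b
        (s.1 ++ [a], a)) (out, a)).1 = out ++ scanTail a l := by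
  induction l generalizing out a with
  | nil => simp [scanTail]
  | cons b l ih =>
    have hie : out.isEmpty = false := by simp [hout]
    simp only [List.foldl_cons, hie, Bool.false_eq_true, if_false]
    rw [ih (out ++ [PySem.Int.bor a b]) (PySem.Int.bor a b) (by simp)]
    simp [scanTail]

theorem prefix_or3_alt_eq_scanOf (x : List Int) (hx : x ≠ []) : prefix_or3_alt x = scanOf x := by
  obtain ⟨h, t, rfl⟩ := List.exists_cons_of_ne_nil hx
  have key := alt_loop_inv t [h] h (by simp)
  have e1 : prefix_or3_alt (h :: t) = ([h] ++ scanTail h t) := by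
    rw [← key]; rfl
  rw [e1]; simp [scanOf, orScan_eq_cons_scanTail]

-- ===== VERDICT (by name: the statement is the Claim_ definition above) =====
theorem prefix_or3_spec : Claim_equal_prefix_or3 := by
  intro x _ hpre
  unfold Spec_prefix_or3
  rw [prefix_or3_eq_scanOf x hpre, prefix_or3_alt_eq_scanOf x hpre]
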